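-- pv_equiv track=rewrite | github.com/Keshav1516/llms.txt-file-generator | llm_txt_file_generator.py | is_bot_blocked
-- ===== SOURCE A (Python) =====
-- def is_bot_blocked(html):
--     signals = [
--         "cf-challenge",
--         "captcha",
--         "verify you are human",
--         "access denied",
--         "cloudflare"
--     ]
--     return any(signal in html.lower() for signal in signals)
-- ===== SOURCE B (Python) =====
-- SIGNALS = (
--     "cf-challenge",
--     "captcha",
--     "verify you are human",
--     "access denied",
--     "cloudflare",
-- )
--
-- def is_bot_blocked(html):
--     text = html.lower()
--     for i in range(len(text)):
--         if text.startswith(SIGNALS, i):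
--             return True
--     return False
-- ===== Notes on version B (the rewrite author's own statement) =====
-- stated objective: alternative
-- what changed: B makes a single left-to-right pass over the lowered text, testing at each position whether any of the five signals starts there (one tuple startswith per position), instead of A's five independent full substring-containment scans.
import Mathlib
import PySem

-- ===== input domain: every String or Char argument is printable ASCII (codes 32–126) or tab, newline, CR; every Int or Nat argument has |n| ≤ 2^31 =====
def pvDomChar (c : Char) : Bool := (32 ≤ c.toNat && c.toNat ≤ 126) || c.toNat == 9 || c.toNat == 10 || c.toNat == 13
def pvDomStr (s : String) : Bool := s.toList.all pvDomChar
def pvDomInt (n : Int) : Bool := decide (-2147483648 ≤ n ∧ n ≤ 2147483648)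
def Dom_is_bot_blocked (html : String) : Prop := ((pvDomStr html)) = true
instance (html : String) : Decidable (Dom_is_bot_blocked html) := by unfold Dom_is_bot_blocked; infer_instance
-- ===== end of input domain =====

-- B replaces A's five independent substring-containment scans by one left-to-right pass
-- that tests all five signals at each position (objective: alternative structure).

-- ===== PORT A =====
-- A: list of signals, any(signal in html.lower() for signal in signals)
def is_bot_blocked (html : String) : Bool :=
  let signals : List String :=
    ["cf-challenge", "captcha", "verify you are human", "access denied", "cloudflare"]
  signals.any (fun signal => PySem.Str.isIn signal (PySem.Str.lower html))

-- ===== PORT B =====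
-- B's signal tuple, as lists of chars (the scan works position by position on chars)
def botSignals : List (List Char) :=
  ["cf-challenge".toList, "captcha".toList, "verify you are human".toList,
   "access denied".toList, "cloudflare".toList]

-- the 'for i in range(len(text)): if text.startswith(SIGNALS, i): return True' loop,
-- as structural recursion over the suffix starting at position i
def botScan : List Char → Bool
  | [] => false
  | c :: rest =>
    if botSignals.any (fun s => s.isPrefixOf (c :: rest)) then true
    else botScan rest

def is_bot_blocked_alt (html : String) : Bool :=
  botScan (PySem.Str.lower html).toList

-- ===== PRECONDITION & SPEC =====
def Spec_is_bot_blocked (html : String) (out : Bool) : Prop := out = is_bot_blocked_alt html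
instance (html : String) (out : Bool) : Decidable (Spec_is_bot_blocked html out) := by unfold Spec_is_bot_blocked; infer_instance

-- ===== CLAIM (what is proved, stated in full; the proofs are below) =====
def Claim_equal_is_bot_blocked : Prop := ∀ (html : String), Dom_is_bot_blocked html → Spec_is_bot_blocked html (is_bot_blocked html)

-- ===== LEMMAS AND PROOFS =====

-- the scan finds exactly the suffix-positions at which some signal is an infix
lemma botScan_iff (cs : List Char) :
    botScan cs = true ↔ ∃ s ∈ botSignals, s <:+: cs := by
  induction cs with
  | nil =>
    simp only [botScan, Bool.false_eq_true, false_iff]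
    rintro ⟨s, hs, hinf⟩
    have hne : s ≠ [] := by fin_cases hs <;> simp
    exact hne (List.eq_nil_of_infix_nil hinf)
  | cons c rest ih =>
    rw [botScan]
    by_cases h : (botSignals.any (fun s => s.isPrefixOf (c :: rest))) = true
    · rw [if_pos h]
      simp only [true_iff]
      rcases List.any_eq_true.mp h with ⟨s, hs, hp⟩
      exact ⟨s, hs, (List.isPrefixOf_iff_prefix.mp hp).isInfix⟩
    · rw [if_neg h, ih]
      constructor
      · rintro ⟨s, hs, hinf⟩; exact ⟨s, hs, List.infix_cons_iff.mpr (Or.inr hinf)⟩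
      · rintro ⟨s, hs, hinf⟩
        rcases (List.infix_cons_iff).mp hinf with hpre | hinf'
        · exact absurd (List.any_eq_true.mpr ⟨s, hs, List.isPrefixOf_iff_prefix.mpr hpre⟩ : (botSignals.any fun s => s.isPrefixOf (c :: rest)) = true) h
        · exact ⟨s, hs, hinf'⟩

-- ===== VERDICT (by name: the statement is the Claim_ definition above) =====
theorem is_bot_blocked_spec : Claim_equal_is_bot_blocked := by
  intro html _
  unfold Spec_is_bot_blocked is_bot_blocked is_bot_blocked_alt
  rw [Bool.eq_iff_iff, List.any_eq_true, botScan_iff]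
  constructor
  · rintro ⟨sig, hsig, hin⟩
    refine ⟨sig.toList, ?_, (PySem.Str.isIn_iff_infix _ _).mp hin⟩
    fin_cases hsig <;> simp [botSignals]
  · rintro ⟨s, hs, hinf⟩
    fin_cases hs
    · exact ⟨"cf-challenge", by simp, (PySem.Str.isIn_iff_infix _ _).mpr hinf⟩
    · exact ⟨"captcha", by simp, (PySem.Str.isIn_iff_infix _ _).mpr hinf⟩
    · exact ⟨"verify you are human", by simp, (PySem.Str.isIn_iff_infix _ _).mpr hinf⟩
    · exact ⟨"access denied", by simp, (PySem.Str.isIn_iff_infix _ _).mpr hinf⟩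
    · exact ⟨"cloudflare", by simp, (PySem.Str.isIn_iff_infix _ _).mpr hinf⟩
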